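-- pv_equiv track=rewrite | github.com/CuriousJ415/MinouChat | src/miachat/api/core/setup_service.py | _get_best_model_recommendation
-- ===== SOURCE A (Python) =====
-- from typing import Dict, List, Optional, Any, Tuple
--
-- def _get_best_model_recommendation(available_models: List[Tuple[str, str]],
--                                  category: str) -> Tuple[Optional[str], Optional[str]]:
--     """Get best model recommendation based on category and availability"""
--
--     # Priority order: local models first (privacy), then cloud
--     preference_order = [
--         # Local models (Ollama) - highest privacy
--         ("ollama", "llama3.1:latest"),
--         ("ollama", "llama3:latest"),
--         ("ollama", "mistral:latest"),
--
--         # Cloud models - for when local isn't available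
--         ("openai", "gpt-4o"),
--         ("anthropic", "claude-3-5-sonnet-20241022"),
--         ("openrouter", "openai/gpt-4o"),
--     ]
--
--     for provider, model in preference_order:
--         if (provider, model) in available_models:
--             return provider, model
--
--     # If nothing from preference list, return first available
--     if available_models:
--         return available_models[0]
--
--     return None, None
-- ===== SOURCE B (Python) =====
-- from typing import Dict, List, Optional, Any, Tuple
--
-- def _get_best_model_recommendation(available_models: List[Tuple[str, str]],
--                                  category: str) -> Tuple[Optional[str], Optional[str]]:
--     """Get best model recommendation based on category and availability"""
--
--     preference_order = [
--         ("ollama", "llama3.1:latest"),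
--         ("ollama", "llama3:latest"),
--         ("ollama", "mistral:latest"),
--         ("openai", "gpt-4o"),
--         ("anthropic", "claude-3-5-sonnet-20241022"),
--         ("openrouter", "openai/gpt-4o"),
--     ]
--     rank = {pm: i for i, pm in enumerate(preference_order)}
--
--     if not available_models:
--         return None, None
--     # min is stable: among entries with the same (lowest) rank -- including the
--     # all-unranked case, where every key is len(preference_order) -- it returns
--     # the first one, which reproduces the "first available" fallback.
--     return min(available_models, key=lambda pm: rank.get(pm, len(preference_order)))
-- ===== Notes on version B (the rewrite author's own statement) =====
-- stated objective: alternative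
-- what changed: Instead of scanning the fixed preference list and testing each entry's membership in available_models, B builds a pair-to-rank dict from the preference list and returns min(available_models, key=rank-or-len), whose stability reproduces both the preference order and the first-available fallback.
import Mathlib
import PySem

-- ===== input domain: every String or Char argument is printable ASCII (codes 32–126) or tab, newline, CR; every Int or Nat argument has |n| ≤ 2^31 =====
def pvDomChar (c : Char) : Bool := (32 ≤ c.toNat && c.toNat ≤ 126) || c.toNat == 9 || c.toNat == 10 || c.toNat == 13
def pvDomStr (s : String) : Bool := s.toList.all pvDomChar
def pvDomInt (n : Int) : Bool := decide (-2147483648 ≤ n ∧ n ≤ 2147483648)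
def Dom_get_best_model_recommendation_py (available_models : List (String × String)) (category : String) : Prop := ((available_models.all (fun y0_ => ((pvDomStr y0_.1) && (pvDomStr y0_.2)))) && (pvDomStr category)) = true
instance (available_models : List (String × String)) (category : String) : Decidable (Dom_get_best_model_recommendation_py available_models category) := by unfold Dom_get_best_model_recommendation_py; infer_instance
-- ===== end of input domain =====

-- B replaces A's scan of the fixed preference list (a membership test per preference)
-- by a pair-to-rank table and one stable min-by-rank pass over available_models.


-- ===== PORT A =====
-- A's literal preference_order list
def preference_order : List (String × String) :=
  [("ollama", "llama3.1:latest"),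
   ("ollama", "llama3:latest"),
   ("ollama", "mistral:latest"),
   ("openai", "gpt-4o"),
   ("anthropic", "claude-3-5-sonnet-20241022"),
   ("openrouter", "openai/gpt-4o")]

-- A's for-loop over preference_order: first entry contained in available_models
def aScan (avail : List (String × String)) : List (String × String) → Option (String × String)
  | [] => none
  | pm :: rest => if avail.contains pm then some pm else aScan avail rest

def get_best_model_recommendation_py (available_models : List (String × String)) (category : String) : Option String × Option String :=
  match aScan available_models preference_order with
  | some pm => (some pm.1, some pm.2)
  | none =>
    match available_models with
    | x :: _ => (some x.1, some x.2)
    | [] => (none, none)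

-- ===== PORT B =====
-- B's preference_order (B builds its rank table from it)
def prefsB : List (String × String) :=
  [("ollama", "llama3.1:latest"),
   ("ollama", "llama3:latest"),
   ("ollama", "mistral:latest"),
   ("openai", "gpt-4o"),
   ("anthropic", "claude-3-5-sonnet-20241022"),
   ("openrouter", "openai/gpt-4o")]

-- B's dict comprehension: rank = {pm: i for i, pm in enumerate(preference_order)}
def rankB : PySem.Dict (String × String) Int :=
  (PySem.List.enumerate prefsB).foldl (fun d p => d.insert p.2 p.1) (PySem.Dict.ofList [])

-- B's key lambda: rank.get(pm, len(preference_order))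
def keyB (pm : String × String) : Int := rankB.getD pm (prefsB.length : Int)

-- min(available_models, key=...) after the emptiness guard
def get_best_model_recommendation_py_alt (available_models : List (String × String)) (category : String) : Option String × Option String :=
  if available_models.isEmpty then (none, none)
  else
    match PySem.List.min? available_models keyB with
    | some m => (some m.1, some m.2)
    | none => (none, none)   -- unreachable: available_models is nonempty

-- ===== PRECONDITION & SPEC =====
def Spec_get_best_model_recommendation_py (available_models : List (String × String)) (category : String) (out : Option String × Option String) : Prop := out = get_best_model_recommendation_py_alt available_models category
instance (available_models : List (String × String)) (category : String) (out : Option String × Option String) : Decidable (Spec_get_best_model_recommendation_py available_models category out) := by unfold Spec_get_best_model_recommendation_py; infer_instance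

-- ===== CLAIM =====
def Claim_equal_get_best_model_recommendation_py : Prop := ∀ (available_models : List (String × String)) (category : String), Dom_get_best_model_recommendation_py available_models category → Spec_get_best_model_recommendation_py available_models category (get_best_model_recommendation_py available_models category)

-- ===== LEMMAS AND PROOFS =====

-- every pair either sits in the rank table (and is the unique pair of its rank) or has key 6
lemma keyB_chain (x : String × String) :
    (x = ("ollama", "llama3.1:latest") ∧ keyB x = 0) ∨
    (x = ("ollama", "llama3:latest") ∧ keyB x = 1) ∨
    (x = ("ollama", "mistral:latest") ∧ keyB x = 2) ∨
    (x = ("openai", "gpt-4o") ∧ keyB x = 3) ∨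
    (x = ("anthropic", "claude-3-5-sonnet-20241022") ∧ keyB x = 4) ∨
    (x = ("openrouter", "openai/gpt-4o") ∧ keyB x = 5) ∨
    keyB x = 6 := by
  have h : rankB = PySem.Dict.mk
      [(("ollama", "llama3.1:latest"), 0), (("ollama", "llama3:latest"), 1),
       (("ollama", "mistral:latest"), 2), (("openai", "gpt-4o"), 3),
       (("anthropic", "claude-3-5-sonnet-20241022"), 4), (("openrouter", "openai/gpt-4o"), 5)] := by
    decide
  by_cases h1 : x = ("ollama", "llama3.1:latest")
  · exact Or.inl ⟨h1, by subst h1; decide⟩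
  by_cases h2 : x = ("ollama", "llama3:latest")
  · exact Or.inr (Or.inl ⟨h2, by subst h2; decide⟩)
  by_cases h3 : x = ("ollama", "mistral:latest")
  · exact Or.inr (Or.inr (Or.inl ⟨h3, by subst h3; decide⟩))
  by_cases h4 : x = ("openai", "gpt-4o")
  · exact Or.inr (Or.inr (Or.inr (Or.inl ⟨h4, by subst h4; decide⟩)))
  by_cases h5 : x = ("anthropic", "claude-3-5-sonnet-20241022")
  · exact Or.inr (Or.inr (Or.inr (Or.inr (Or.inl ⟨h5, by subst h5; decide⟩))))
  by_cases h6 : x = ("openrouter", "openai/gpt-4o")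
  · exact Or.inr (Or.inr (Or.inr (Or.inr (Or.inr (Or.inl ⟨h6, by subst h6; decide⟩)))))
  refine Or.inr (Or.inr (Or.inr (Or.inr (Or.inr (Or.inr ?_)))))
  unfold keyB PySem.Dict.getD
  rw [h]
  simp only [PySem.Dict.get?_mk_cons, beq_iff_eq]
  rw [if_neg (fun hh => h1 hh.symm), if_neg (fun hh => h2 hh.symm),
      if_neg (fun hh => h3 hh.symm), if_neg (fun hh => h4 hh.symm),
      if_neg (fun hh => h5 hh.symm), if_neg (fun hh => h6 hh.symm)]
  simp [PySem.Dict.get?]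
  decide

lemma keyB_nonneg (x : String × String) : 0 ≤ keyB x := by
  rcases keyB_chain x with ⟨_, h⟩|⟨_, h⟩|⟨_, h⟩|⟨_, h⟩|⟨_, h⟩|⟨_, h⟩|h <;> omega

-- min?'s foldl keeps an accumulator no later element beats
lemma foldl_min_keep {α : Type} (key : α → Int) (t : List α) :
    ∀ m : α, (∀ y ∈ t, ¬ key y < key m) →
      t.foldl (fun acc x =>
        match acc with
        | none => some x
        | some m => if key x < key m then some x else some m) (some m) = some m := by
  induction t with
  | nil => intro m _; rfl
  | cons y t ih =>
    intro m h
    simp only [List.foldl_cons]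
    rw [if_neg (h y List.mem_cons_self)]
    exact ih m (fun z hz => h z (List.mem_cons_of_mem _ hz))

-- the first extremum: if p ∈ l has the strictly smallest key, min? returns p
lemma min?_unique {l : List (String × String)} {p m : String × String}
    (hp : p ∈ l) (hmin : ∀ y ∈ l, keyB p ≤ keyB y)
    (huniq : ∀ y ∈ l, keyB y = keyB p → y = p)
    (hm : PySem.List.min? l keyB = some m) : m = p := by
  have h1 : keyB m ≤ keyB p := PySem.List.min?_isMin hm p hp
  have h2 : keyB p ≤ keyB m := hmin m (PySem.List.min?_mem hm)
  exact huniq m (PySem.List.min?_mem hm) (le_antisymm h1 h2)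

-- B's value when the preference pair p of rank r is the lowest-ranked available entry
lemma alt_caseRank (l : List (String × String)) (c : String) (p : String × String) (r : Int)
    (hp : p ∈ l) (hkp : keyB p = r)
    (hmin : ∀ y ∈ l, r ≤ keyB y) (huniq : ∀ y ∈ l, keyB y = r → y = p) :
    get_best_model_recommendation_py_alt l c = (some p.1, some p.2) := by
  unfold get_best_model_recommendation_py_alt
  rw [if_neg (by simpa [List.isEmpty_iff] using List.ne_nil_of_mem hp)]
  rcases hm : PySem.List.min? l keyB with _ | m
  · exact absurd ((PySem.List.min?_eq_none_iff _ _).mp hm) (List.ne_nil_of_mem hp)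
  · have hmp : m = p := min?_unique hp
      (fun y hy => by rw [hkp]; exact hmin y hy)
      (fun y hy hk => huniq y hy (by rw [hk, hkp])) hm
    subst hmp
    rfl

-- B's value when nothing is ranked: min is the first element (all keys equal)
lemma alt_all6 (x : String × String) (t : List (String × String)) (c : String)
    (h : ∀ y ∈ x :: t, keyB y = 6) :
    get_best_model_recommendation_py_alt (x :: t) c = (some x.1, some x.2) := by
  unfold get_best_model_recommendation_py_alt
  rw [if_neg (by simp)]
  have hfold : PySem.List.min? (x :: t) keyB = some x := by
    unfold PySem.List.min?
    simp only [List.foldl_cons]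
    exact foldl_min_keep keyB t x (fun y hy => by
      rw [h y (List.mem_cons_of_mem _ hy), h x List.mem_cons_self]; omega)
  rw [hfold]

-- ===== VERDICT =====
theorem get_best_model_recommendation_py_spec : Claim_equal_get_best_model_recommendation_py := by
  intro l c _
  unfold Spec_get_best_model_recommendation_py
  by_cases h1 : ("ollama", "llama3.1:latest") ∈ l
  · rw [alt_caseRank l c _ 0 h1 (by decide)
      (fun y hy => keyB_nonneg y)
      (fun y hy hk => by
        rcases keyB_chain y with ⟨rfl, hk'⟩|⟨rfl, hk'⟩|⟨rfl, hk'⟩|⟨rfl, hk'⟩|⟨rfl, hk'⟩|⟨rfl, hk'⟩|hk' <;>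
          first | rfl | omega)]
    simp [get_best_model_recommendation_py, aScan, preference_order, h1]
  · by_cases h2 : ("ollama", "llama3:latest") ∈ l
    · rw [alt_caseRank l c _ 1 h2 (by decide)
        (fun y hy => by
          rcases keyB_chain y with ⟨rfl, hk'⟩|⟨rfl, hk'⟩|⟨rfl, hk'⟩|⟨rfl, hk'⟩|⟨rfl, hk'⟩|⟨rfl, hk'⟩|hk' <;>
            first | omega | exact absurd hy h1)
        (fun y hy hk => by
          rcases keyB_chain y with ⟨rfl, hk'⟩|⟨rfl, hk'⟩|⟨rfl, hk'⟩|⟨rfl, hk'⟩|⟨rfl, hk'⟩|⟨rfl, hk'⟩|hk' <;>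
            first | rfl | omega)]
      simp [get_best_model_recommendation_py, aScan, preference_order, h1, h2]
    · by_cases h3 : ("ollama", "mistral:latest") ∈ l
      · rw [alt_caseRank l c _ 2 h3 (by decide)
          (fun y hy => by
            rcases keyB_chain y with ⟨rfl, hk'⟩|⟨rfl, hk'⟩|⟨rfl, hk'⟩|⟨rfl, hk'⟩|⟨rfl, hk'⟩|⟨rfl, hk'⟩|hk' <;>
              first | omega | exact absurd hy h1 | exact absurd hy h2)
          (fun y hy hk => by
            rcases keyB_chain y with ⟨rfl, hk'⟩|⟨rfl, hk'⟩|⟨rfl, hk'⟩|⟨rfl, hk'⟩|⟨rfl, hk'⟩|⟨rfl, hk'⟩|hk' <;>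
              first | rfl | omega)]
        simp [get_best_model_recommendation_py, aScan, preference_order, h1, h2, h3]
      · by_cases h4 : ("openai", "gpt-4o") ∈ l
        · rw [alt_caseRank l c _ 3 h4 (by decide)
            (fun y hy => by
              rcases keyB_chain y with ⟨rfl, hk'⟩|⟨rfl, hk'⟩|⟨rfl, hk'⟩|⟨rfl, hk'⟩|⟨rfl, hk'⟩|⟨rfl, hk'⟩|hk' <;>
                first | omega | exact absurd hy h1 | exact absurd hy h2
                      | exact absurd hy h3)
            (fun y hy hk => by
              rcases keyB_chain y with ⟨rfl, hk'⟩|⟨rfl, hk'⟩|⟨rfl, hk'⟩|⟨rfl, hk'⟩|⟨rfl, hk'⟩|⟨rfl, hk'⟩|hk' <;>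
                first | rfl | omega)]
          simp [get_best_model_recommendation_py, aScan, preference_order, h1, h2, h3, h4]
        · by_cases h5 : ("anthropic", "claude-3-5-sonnet-20241022") ∈ l
          · rw [alt_caseRank l c _ 4 h5 (by decide)
              (fun y hy => by
                rcases keyB_chain y with ⟨rfl, hk'⟩|⟨rfl, hk'⟩|⟨rfl, hk'⟩|⟨rfl, hk'⟩|⟨rfl, hk'⟩|⟨rfl, hk'⟩|hk' <;>
                  first | omega | exact absurd hy h1 | exact absurd hy h2
                        | exact absurd hy h3 | exact absurd hy h4)
              (fun y hy hk => by
                rcases keyB_chain y with ⟨rfl, hk'⟩|⟨rfl, hk'⟩|⟨rfl, hk'⟩|⟨rfl, hk'⟩|⟨rfl, hk'⟩|⟨rfl, hk'⟩|hk' <;>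
                  first | rfl | omega)]
            simp [get_best_model_recommendation_py, aScan, preference_order, h1, h2, h3, h4, h5]
          · by_cases h6 : ("openrouter", "openai/gpt-4o") ∈ l
            · rw [alt_caseRank l c _ 5 h6 (by decide)
                (fun y hy => by
                  rcases keyB_chain y with ⟨rfl, hk'⟩|⟨rfl, hk'⟩|⟨rfl, hk'⟩|⟨rfl, hk'⟩|⟨rfl, hk'⟩|⟨rfl, hk'⟩|hk' <;>
                    first | omega | exact absurd hy h1 | exact absurd hy h2
                          | exact absurd hy h3 | exact absurd hy h4
                          | exact absurd hy h5)
                (fun y hy hk => by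
                  rcases keyB_chain y with ⟨rfl, hk'⟩|⟨rfl, hk'⟩|⟨rfl, hk'⟩|⟨rfl, hk'⟩|⟨rfl, hk'⟩|⟨rfl, hk'⟩|hk' <;>
                    first | rfl | omega)]
              simp [get_best_model_recommendation_py, aScan, preference_order, h1, h2, h3, h4, h5, h6]
            · cases l with
              | nil => rfl
              | cons x t =>
                rw [alt_all6 x t c (fun y hy => by
                  rcases keyB_chain y with ⟨rfl, hk'⟩|⟨rfl, hk'⟩|⟨rfl, hk'⟩|⟨rfl, hk'⟩|⟨rfl, hk'⟩|⟨rfl, hk'⟩|hk' <;>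
                    first | exact hk'
                          | exact absurd hy h1 | exact absurd hy h2
                          | exact absurd hy h3 | exact absurd hy h4
                          | exact absurd hy h5 | exact absurd hy h6)]
                simp [get_best_model_recommendation_py, aScan, preference_order, h1, h2, h3, h4, h5, h6]
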